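-- pv_equiv track=rewrite | github.com/chaseakat/Label_Maker | label_engine.py | shelf_set_labels
-- ===== SOURCE A (Python) =====
-- def shelf_set_labels(n: int):
--     labels = []
--     i = 1
--     while i <= n:
--         j = min(i + 1, n)
--         if i == j:
--             labels.append(f"SHELF {i}")
--         else:
--             labels.append(f"SHELVES {i}-{j}")
--         i += 2
--     return labels
-- ===== SOURCE B (Python) =====
-- def shelf_set_labels(n: int):
--     # Build the labels back-to-front: walk down from n, emitting the lone
--     # shelf first (only possible at the top when n is odd), then whole pairs,
--     # and reverse once at the end.
--     labels = []
--     k = n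
--     while k >= 1:
--         if k % 2 == 1:
--             labels.append(f"SHELF {k}")
--             k -= 1
--         else:
--             labels.append(f"SHELVES {k - 1}-{k}")
--             k -= 2
--     labels.reverse()
--     return labels
-- ===== Notes on version B (the rewrite author's own statement) =====
-- stated objective: alternative
-- what changed: B constructs the label list back-to-front: it walks DOWN from n, emits the lone odd shelf first (only reachable at the top) then whole pairs with no min and no per-iteration boundary test, and reverses once at the end, instead of A's ascending while loop that recomputes min(i+1, n) and branches on i == j every iteration.
import Mathlib
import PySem

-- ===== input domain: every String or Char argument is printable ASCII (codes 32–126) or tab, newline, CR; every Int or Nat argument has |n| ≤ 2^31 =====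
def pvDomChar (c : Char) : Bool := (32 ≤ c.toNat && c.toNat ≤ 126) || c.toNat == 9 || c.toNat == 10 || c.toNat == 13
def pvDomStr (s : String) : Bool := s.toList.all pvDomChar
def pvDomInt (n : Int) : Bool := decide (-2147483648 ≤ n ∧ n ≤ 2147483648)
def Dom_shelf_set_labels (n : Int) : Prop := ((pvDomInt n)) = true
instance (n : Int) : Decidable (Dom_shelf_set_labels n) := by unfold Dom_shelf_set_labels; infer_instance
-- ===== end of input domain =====

-- B builds the label list back-to-front (descending walk from n, lone odd shelf first, then
-- whole pairs, one final reverse) instead of A's ascending min/branch loop (objective: alternative).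

-- ===== PORT A =====
-- A's while loop: i from 1 by 2 while i ≤ n; j = min(i+1, n); branch on i == j.
def shelfLoopA (n i : Int) (labels : List String) : List String :=
  if _h : i ≤ n then
    let j := min (i + 1) n
    if i = j then
      shelfLoopA n (i + 2) (labels ++ ["SHELF " ++ PySem.Int.toStr i])
    else
      shelfLoopA n (i + 2) (labels ++ ["SHELVES " ++ PySem.Int.toStr i ++ "-" ++ PySem.Int.toStr j])
  else labels
termination_by (n + 1 - i).toNat
decreasing_by all_goals omega

def shelf_set_labels (n : Int) : List String := shelfLoopA n 1 []

-- ===== PORT B =====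
-- B's while loop: k from n downward; odd k emits the lone shelf and steps 1, even k emits a
-- whole pair and steps 2; the accumulated list is reversed once at the end.
def shelfLoopB (k : Int) (labels : List String) : List String :=
  if _h : k ≥ 1 then
    if PySem.Int.mod k 2 = 1 then
      shelfLoopB (k - 1) (labels ++ ["SHELF " ++ PySem.Int.toStr k])
    else
      shelfLoopB (k - 2) (labels ++ ["SHELVES " ++ PySem.Int.toStr (k - 1) ++ "-" ++ PySem.Int.toStr k])
  else labels
termination_by k.toNat
decreasing_by all_goals omega

def shelf_set_labels_alt (n : Int) : List String := (shelfLoopB n []).reverse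

-- ===== PRECONDITION & SPEC =====
def Spec_shelf_set_labels (n : Int) (out : List String) : Prop := out = shelf_set_labels_alt n
instance (n : Int) (out : List String) : Decidable (Spec_shelf_set_labels n out) := by unfold Spec_shelf_set_labels; infer_instance

-- ===== CLAIM (what is proved, stated in full; the proofs are below) =====
def Claim_equal_shelf_set_labels : Prop := ∀ (n : Int), Dom_shelf_set_labels n → Spec_shelf_set_labels n (shelf_set_labels n)

-- ===== LEMMAS AND PROOFS =====

-- step-2 range: empty, odd-top and even-top (snoc) forms
theorem pyRange_two_eq_nil (a b : Int) (h : b ≤ a) : PySem.List.pyRange a b 2 = [] := by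
  rw [PySem.List.pyRange_of_pos a b (by norm_num : (0:Int) < 2)]
  simp [if_neg (by omega : ¬ a < b)]

theorem pyRange_two_odd (n : Int) (h : n % 2 = 1) :
    PySem.List.pyRange 1 n 2 = PySem.List.pyRange 1 (n - 1) 2 := by
  rw [PySem.List.pyRange_of_pos 1 n (by norm_num : (0:Int) < 2),
      PySem.List.pyRange_of_pos 1 (n - 1) (by norm_num : (0:Int) < 2)]
  have : (if (1:Int) < n then ((n - 1 + 2 - 1) / 2).toNat else 0)
       = (if (1:Int) < n - 1 then ((n - 1 - 1 + 2 - 1) / 2).toNat else 0) := by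
    by_cases h1 : (1:Int) < n
    · by_cases h2 : (1:Int) < n - 1 <;> simp [h1, h2] <;> omega
    · simp [if_neg h1, if_neg (by omega : ¬ (1:Int) < n - 1)]
  rw [this]

theorem pyRange_two_snoc (n : Int) (h2 : 2 ≤ n) (he : n % 2 = 0) :
    PySem.List.pyRange 1 n 2 = PySem.List.pyRange 1 (n - 2) 2 ++ [n - 1] := by
  rw [PySem.List.pyRange_of_pos 1 n (by norm_num : (0:Int) < 2),
      PySem.List.pyRange_of_pos 1 (n - 2) (by norm_num : (0:Int) < 2)]
  have hn : (1:Int) < n := by omega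
  rw [if_pos hn]
  by_cases h3 : (1:Int) < n - 2
  · rw [if_pos h3]
    have hcount : ((n - 1 + 2 - 1) / 2).toNat = ((n - 2 - 1 + 2 - 1) / 2).toNat + 1 := by omega
    rw [hcount, List.range_succ]
    simp only [List.map_append, List.map_cons, List.map_nil]
    congr 1
    simp only [List.cons.injEq, and_true]
    omega
  · rw [if_neg h3]
    have hcount : ((n - 1 + 2 - 1) / 2).toNat = 1 := by omega
    simp only [hcount, List.range_succ, List.range_zero, List.nil_append, List.map_cons,
      List.map_nil, List.cons.injEq, and_true]
    push_cast
    omega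

-- A's ascending characterisation: pair labels over the step-2 range plus the odd leftover
theorem shelfLoopA_eq_aux (n : Int) (m : Nat) : ∀ (i : Int) (labels : List String),
    (n + 1 - i).toNat ≤ m → i % 2 = 1 →
    shelfLoopA n i labels =
      labels ++ (PySem.List.pyRange i n 2).map
        (fun k => "SHELVES " ++ PySem.Int.toStr k ++ "-" ++ PySem.Int.toStr (k + 1)) ++
      (if i ≤ n ∧ n % 2 = 1 then ["SHELF " ++ PySem.Int.toStr n] else []) := by
  induction m with
  | zero =>
    intro i labels hm hodd
    have hle : ¬ i ≤ n := by omega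
    rw [shelfLoopA, dif_neg hle, pyRange_two_eq_nil _ _ (by omega)]
    simp [hle]
  | succ m IH =>
    intro i labels hm hodd
    rw [shelfLoopA]
    by_cases hle : i ≤ n
    · rw [dif_pos hle]
      by_cases heq : i = min (i + 1) n
      · have hni : n = i := by omega
        rw [if_pos heq]
        rw [IH (i + 2) _ (by omega) (by omega)]
        rw [pyRange_two_eq_nil _ _ (by omega), pyRange_two_eq_nil _ _ (by omega)]
        have h1 : ¬ (i + 2 ≤ n ∧ n % 2 = 1) := by omega
        have h2 : i ≤ n ∧ n % 2 = 1 := by omega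
        simp [hni, hodd]
      · have hlt : i < n := by omega
        rw [if_neg heq]
        rw [IH (i + 2) _ (by omega) (by omega)]
        have hcons : PySem.List.pyRange i n 2 = i :: PySem.List.pyRange (i + 2) n 2 := by
          rw [PySem.List.pyRange_of_pos i n (by norm_num : (0:Int) < 2),
              PySem.List.pyRange_of_pos (i + 2) n (by norm_num : (0:Int) < 2)]
          rw [if_pos hlt]
          by_cases h2 : i + 2 < n
          · rw [if_pos h2]
            have hcount : ((n - i + 2 - 1) / 2).toNat = ((n - (i + 2) + 2 - 1) / 2).toNat + 1 := by
              omega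
            rw [hcount, List.range_succ_eq_map]
            simp [List.map_map, Function.comp]
            intro k _
            ring
          · rw [if_neg h2]
            have hcount : ((n - i + 2 - 1) / 2).toNat = 1 := by omega
            simp [hcount, List.range_succ]
        rw [hcons]
        have hmin : min (i + 1) n = i + 1 := by omega
        have hiff : (i + 2 ≤ n ∧ n % 2 = 1) ↔ (i ≤ n ∧ n % 2 = 1) := by omega
        by_cases hc : i ≤ n ∧ n % 2 = 1
        · simp [hmin, hiff.mpr hc, hc]
        · simp [hmin, hc]
          omega
    · rw [dif_neg hle, pyRange_two_eq_nil _ _ (by omega)]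
      simp [hle]

-- the pure descending list B's loop accumulates
def gDesc (k : Int) : List String :=
  if _h : k ≥ 1 then
    if PySem.Int.mod k 2 = 1 then
      ("SHELF " ++ PySem.Int.toStr k) :: gDesc (k - 1)
    else
      ("SHELVES " ++ PySem.Int.toStr (k - 1) ++ "-" ++ PySem.Int.toStr k) :: gDesc (k - 2)
  else []
termination_by k.toNat
decreasing_by all_goals omega

theorem shelfLoopB_eq_gDesc (m : Nat) : ∀ (k : Int) (labels : List String),
    k.toNat ≤ m → shelfLoopB k labels = labels ++ gDesc k := by
  induction m with
  | zero =>
    intro k labels hm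
    have h : ¬ k ≥ 1 := by omega
    rw [shelfLoopB, dif_neg h, gDesc, dif_neg h, List.append_nil]
  | succ m IH =>
    intro k labels hm
    rw [shelfLoopB, gDesc]
    by_cases h : k ≥ 1
    · rw [dif_pos h, dif_pos h]
      by_cases ho : PySem.Int.mod k 2 = 1
      · rw [if_pos ho, if_pos ho, IH (k - 1) _ (by omega)]
        simp
      · rw [if_neg ho, if_neg ho, IH (k - 2) _ (by omega)]
        simp
    · rw [dif_neg h, dif_neg h, List.append_nil]

theorem pymod_two (k : Int) : PySem.Int.mod k 2 = k % 2 := by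
  simp [PySem.Int.mod, Int.fmod_eq_emod]

-- reverse of the descending list = A's ascending characterisation from 1
theorem gDesc_reverse (m : Nat) : ∀ (n : Int), n.toNat ≤ m →
    (gDesc n).reverse =
      (PySem.List.pyRange 1 n 2).map
        (fun k => "SHELVES " ++ PySem.Int.toStr k ++ "-" ++ PySem.Int.toStr (k + 1)) ++
      (if 1 ≤ n ∧ n % 2 = 1 then ["SHELF " ++ PySem.Int.toStr n] else []) := by
  induction m with
  | zero =>
    intro n hm
    have h : ¬ n ≥ 1 := by omega
    rw [gDesc, dif_neg h, pyRange_two_eq_nil _ _ (by omega)]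
    simp
    omega
  | succ m IH =>
    intro n hm
    by_cases h : n ≥ 1
    · rw [gDesc, dif_pos h]
      by_cases ho : n % 2 = 1
      · rw [if_pos (by rw [pymod_two]; exact ho)]
        rw [List.reverse_cons, IH (n - 1) (by omega)]
        rw [pyRange_two_odd n ho]
        have h1 : ¬ (1 ≤ n - 1 ∧ (n - 1) % 2 = 1) := by omega
        have h2 : 1 ≤ n ∧ n % 2 = 1 := ⟨h, ho⟩
        simp [h2]
        intro h3
        omega
      · rw [if_neg (by rw [pymod_two]; exact ho)]
        rw [List.reverse_cons, IH (n - 2) (by omega)]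
        have he : n % 2 = 0 := by omega
        rw [pyRange_two_snoc n (by omega) he]
        have h1 : ¬ (1 ≤ n - 2 ∧ (n - 2) % 2 = 1) := by omega
        have h2 : ¬ (1 ≤ n ∧ n % 2 = 1) := by omega
        simp [h2]
        intro h3
        omega
    · rw [gDesc, dif_neg h, pyRange_two_eq_nil _ _ (by omega)]
      simp
      omega

-- ===== VERDICT (by name: the statement is the Claim_ definition above) =====
theorem shelf_set_labels_spec : Claim_equal_shelf_set_labels := by
  intro n _
  unfold Spec_shelf_set_labels shelf_set_labels shelf_set_labels_alt
  rw [shelfLoopA_eq_aux n (n + 1 - 1).toNat 1 [] (le_refl _) (by decide)]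
  rw [shelfLoopB_eq_gDesc n.toNat n [] (le_refl _)]
  simp only [List.nil_append]
  rw [gDesc_reverse n.toNat n (le_refl _)]
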